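-- pv_equiv track=rewrite | github.com/Meng-Gen/rosalind | TextbookTrack/1G/1g.py | approximating_matching_kmers
-- ===== SOURCE A (Python) =====
-- import itertools
--
-- def approximating_matching_kmers(motif, k, d):
--     all_kmers = set()
--     all_mismatch_patterns = set()
--     for mismatch_pattern in itertools.permutations(['D']*d + ['M']*(k-d), k):
--         all_mismatch_patterns.add(''.join(mismatch_pattern))
--     for pattern in all_mismatch_patterns:
--         for nucleotides in itertools.product('ACGT', repeat=d):
--             kmer = ''
--             mismatch_count = 0
--             for i in range(k):
--                 if pattern[i] == 'M':
--                     kmer += motif[i]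
--                 else:
--                     kmer += nucleotides[mismatch_count]
--                     mismatch_count += 1
--             all_kmers.add(kmer)
--     return all_kmers
-- ===== SOURCE B (Python) =====
-- def approximating_matching_kmers(motif, k, d):
--     # Generate the C(k,d) mismatch patterns directly by recursion (lexicographic,
--     # 'D' < 'M'), instead of deduplicating all k! permutations of the pattern pool.
--     def patterns(n, r):
--         if n <= 0:
--             return ['']
--         out = []
--         if r > 0:
--             out += ['D' + p for p in patterns(n - 1, r - 1)]
--         if r < n:
--             out += ['M' + p for p in patterns(n - 1, r)]
--         return out
--
--     # All substitutions of a pattern: 'M' keeps the motif character, 'D' takes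
--     # each nucleotide; each distinct kmer is produced once per pattern.
--     def fill(pat, chars):
--         if not pat:
--             return ['']
--         rests = fill(pat[1:], chars[1:])
--         if pat[0] == 'M':
--             return [chars[0] + rest for rest in rests]
--         return [c + rest for c in 'ACGT' for rest in rests]
--
--     return {kmer for pat in patterns(k, d) for kmer in fill(pat, motif)}
-- ===== Notes on version B (the rewrite author's own statement) =====
-- stated objective: alternative
-- what changed: B generates the C(k,d) distinct D/M mismatch patterns directly by a combinatorial recursion and substitutes nucleotides recursively per pattern, instead of A's enumeration and set-deduplication of all k! permutations of the pattern pool followed by a 4^d product loop per pattern (it avoids the k!-sized enumeration, but a timing run could not confirm a speed-up on the generated input family, so no speed is claimed).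
import Mathlib
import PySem

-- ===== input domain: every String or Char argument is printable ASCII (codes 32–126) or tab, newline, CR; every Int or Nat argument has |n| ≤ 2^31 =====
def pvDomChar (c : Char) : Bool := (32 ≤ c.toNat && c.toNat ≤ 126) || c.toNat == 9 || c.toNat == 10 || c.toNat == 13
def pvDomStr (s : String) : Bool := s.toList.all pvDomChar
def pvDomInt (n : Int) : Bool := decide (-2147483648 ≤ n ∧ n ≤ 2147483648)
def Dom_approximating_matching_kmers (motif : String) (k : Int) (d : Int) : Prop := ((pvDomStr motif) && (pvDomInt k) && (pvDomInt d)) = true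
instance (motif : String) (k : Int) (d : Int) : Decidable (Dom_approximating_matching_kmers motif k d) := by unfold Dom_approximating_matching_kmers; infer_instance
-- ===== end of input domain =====

-- B replaces A's enumeration + set-deduplication of all k! permutations of the
-- 'D'/'M' pattern pool by a direct combinatorial recursion producing each of the
-- C(k,d) patterns once, and substitutes nucleotides recursively per pattern
-- (objective: alternative algorithm that avoids the k!-sized enumeration).

-- ===== PORT A =====
-- itertools.product('ACGT', repeat=n): tuples in lexicographic order
def pyProduct4 : Nat → List (List Char)
  | 0 => [[]]
  | n+1 => ['A', 'C', 'G', 'T'].flatMap (fun c => (pyProduct4 n).map (fun p => c :: p))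

-- one step of A's inner `for i in range(k)` loop; state = (kmer, mismatch_count);
-- indexing via getD with a dummy default, exact under Pre_ (all indices are in range there)
def kmerStep (pattern mo nu : List Char) (st : List Char × Nat) (i : Nat) : List Char × Nat :=
  if pattern.getD i ' ' = 'M' then (st.1 ++ [mo.getD i ' '], st.2)
  else (st.1 ++ [nu.getD st.2 ' '], st.2 + 1)

def approximating_matching_kmers (motif : String) (k : Int) (d : Int) : List String :=
  let kn := k.toNat
  let dn := d.toNat
  let all_mismatch_patterns : PySem.Set String :=
    (PySem.List.permutations (List.replicate dn 'D' ++ List.replicate (kn - dn) 'M') kn).foldl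
      (fun s mp => PySem.Set.add s (String.ofList mp)) PySem.Set.empty
  all_mismatch_patterns.foldl (fun acc pattern =>
    (pyProduct4 dn).foldl (fun acc2 nucleotides =>
      PySem.Set.add acc2 (String.ofList
        (((List.range kn).foldl (kmerStep pattern.toList motif.toList nucleotides) ([], 0)).1))) acc)
    PySem.Set.empty

-- ===== PORT B =====
-- patterns(L, r): the D/M strings of length L with min(r, L) 'D's, in order
def patsB : Nat → Nat → List (List Char)
  | 0, _ => [[]]
  | n+1, r =>
    (if 0 < r then (patsB n (r-1)).map (fun p => 'D' :: p) else []) ++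
    (if r < n+1 then (patsB n r).map (fun p => 'M' :: p) else [])

-- fill(pat, chars): chars[0]/chars[1:] via getD/drop (getD exact under Pre_)
def fillB : List Char → List Char → List (List Char)
  | [], _ => [[]]
  | p :: ps, chars =>
    let rests := fillB ps (chars.drop 1)
    if p = 'M' then rests.map (fun r => chars.getD 0 ' ' :: r)
    else ['A', 'C', 'G', 'T'].flatMap (fun c => rests.map (fun r => c :: r))

def approximating_matching_kmers_alt (motif : String) (k : Int) (d : Int) : List String :=
  PySem.Set.ofList ((patsB k.toNat d.toNat).flatMap (fun pat =>
    (fillB pat motif.toList).map (fun km => String.ofList km)))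

-- ===== PRECONDITION & SPEC =====
-- exactly where the Python A returns: k, d ≥ 0 (else ValueError from
-- permutations/product) and, when k > d (some pattern then has an 'M' at index k-1),
-- k ≤ len(motif) (else IndexError on motif[i])
def Pre_approximating_matching_kmers (motif : String) (k : Int) (d : Int) : Prop :=
  0 ≤ k ∧ 0 ≤ d ∧ (k ≤ d ∨ k ≤ PySem.Str.len motif)
instance (motif : String) (k : Int) (d : Int) : Decidable (Pre_approximating_matching_kmers motif k d) := by unfold Pre_approximating_matching_kmers; infer_instance

def pvWitness_approximating_matching_kmers : String × Int × Int := ("ACG", 3, 1)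

def Spec_approximating_matching_kmers (motif : String) (k : Int) (d : Int) (out : List String) : Prop := out = approximating_matching_kmers_alt motif k d
instance (motif : String) (k : Int) (d : Int) (out : List String) : Decidable (Spec_approximating_matching_kmers motif k d out) := by unfold Spec_approximating_matching_kmers; infer_instance

-- ===== CLAIM (what is proved, stated in full; the proofs are below) =====
def Claim_equal_approximating_matching_kmers : Prop := ∀ (motif : String) (k : Int) (d : Int), Dom_approximating_matching_kmers motif k d → Pre_approximating_matching_kmers motif k d → Spec_approximating_matching_kmers motif k d (approximating_matching_kmers motif k d)

-- ===== LEMMAS AND PROOFS =====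

-- ---- PySem.Set plumbing ----
theorem pv_update_append {α : Type} [BEq α] (s : PySem.Set α) (X Y : List α) :
    PySem.Set.update s (X ++ Y) = PySem.Set.update (PySem.Set.update s X) Y := by
  simp [PySem.Set.update, List.foldl_append]

theorem pv_mem_update {α : Type} [BEq α] [LawfulBEq α] (s : PySem.Set α) (L : List α) (a : α) :
    a ∈ PySem.Set.update s L ↔ a ∈ s ∨ a ∈ L := by
  induction L generalizing s with
  | nil => simp [PySem.Set.update]
  | cons x L ih =>
    show a ∈ PySem.Set.update (PySem.Set.add s x) L ↔ _
    rw [ih]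
    simp [PySem.Set.mem_add]
    tauto

theorem pv_update_sub {α : Type} [BEq α] [LawfulBEq α] (s : PySem.Set α) (L : List α)
    (h : ∀ x ∈ L, x ∈ s) : PySem.Set.update s L = s := by
  induction L generalizing s with
  | nil => rfl
  | cons x L ih =>
    show PySem.Set.update (PySem.Set.add s x) L = s
    have hx : x ∈ s := h x (by simp)
    have : PySem.Set.add s x = s := by
      simp [PySem.Set.add, PySem.Set.contains, hx]
    rw [this]
    exact ih s (fun y hy => h y (by simp [hy]))

theorem pv_ofList_cons_update {α : Type} [BEq α] (x : α) (L : List α) :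
    PySem.Set.ofList (x :: L) = PySem.Set.update [x] L := rfl

theorem pv_update_canon {α : Type} [BEq α] [LawfulBEq α] (s : PySem.Set α) (L : List α) :
    PySem.Set.update s L = s ++ (PySem.Set.ofList L).filter (fun x => !(s.contains x)) := by
  induction L generalizing s with
  | nil => simp [PySem.Set.update, PySem.Set.ofList]
  | cons x L ih =>
    show PySem.Set.update (PySem.Set.add s x) L = _
    rw [ih, pv_ofList_cons_update, ih]
    simp only [List.filter_append, List.filter_filter]
    by_cases hx : x ∈ s
    · have hadd : PySem.Set.add s x = s := by simp [PySem.Set.add, PySem.Set.contains, hx]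
      rw [hadd]
      have h1 : List.filter (fun y => !s.contains y) [x] = [] := by
        simp [PySem.Set.contains, hx]
      rw [h1, List.nil_append]
      congr 1
      apply List.filter_congr
      intro y _
      by_cases hyx : y = x
      · subst hyx; simp [PySem.Set.contains, hx]
      · simp [PySem.Set.contains, hyx]
    · have hadd : PySem.Set.add s x = s ++ [x] := by simp [PySem.Set.add, PySem.Set.contains, hx]
      rw [hadd]
      have h1 : List.filter (fun y => !s.contains y) [x] = [x] := by
        simp [PySem.Set.contains, hx]
      rw [h1, List.append_assoc]
      congr 1
      congr 1
      apply List.filter_congr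
      intro y _
      by_cases hyx : y = x
      · subst hyx; simp [PySem.Set.contains]
      · simp [PySem.Set.contains, hyx]

theorem pv_ofList_eq_update {α : Type} [BEq α] (L : List α) :
    PySem.Set.ofList L = PySem.Set.update [] L := rfl

theorem pv_ofList_map_inj {α β : Type} [BEq α] [LawfulBEq α] [BEq β] [LawfulBEq β]
    (f : α → β) (hf : Function.Injective f) (L : List α) :
    PySem.Set.ofList (L.map f) = (PySem.Set.ofList L).map f := by
  induction L with
  | nil => rfl
  | cons x L ih =>
    have hx : ∀ (M : List α), PySem.Set.ofList (x :: M) = x :: (PySem.Set.ofList M).filter (fun y => !(y == x)) := by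
      intro M
      rw [pv_ofList_cons_update, pv_update_canon]
      simp [PySem.Set.contains]
    have hfx : ∀ (M : List β), PySem.Set.ofList (f x :: M) = f x :: (PySem.Set.ofList M).filter (fun y => !(y == f x)) := by
      intro M
      rw [pv_ofList_cons_update, pv_update_canon]
      simp [PySem.Set.contains]
    rw [List.map_cons, hfx, hx, ih, List.map_cons, List.filter_map]
    congr 1
    congr 1
    apply List.filter_congr
    intro y _
    simp only [Function.comp]
    rcases eq_or_ne y x with rfl | hne
    · simp
    · have : ¬ f y = f x := fun h => hne (hf h)
      simp [hne, this]

theorem pv_add_add {α : Type} [BEq α] [LawfulBEq α] (s : PySem.Set α) (x : α) :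
    PySem.Set.add (PySem.Set.add s x) x = PySem.Set.add s x := by
  by_cases hx : x ∈ s
  · have h1 : PySem.Set.add s x = s := by simp [PySem.Set.add, PySem.Set.contains, hx]
    rw [h1, h1]
  · have h1 : PySem.Set.add s x = s ++ [x] := by simp [PySem.Set.add, PySem.Set.contains, hx]
    rw [h1]
    have h2 : PySem.Set.contains (s ++ [x]) x = true := by simp [PySem.Set.contains]
    rw [PySem.Set.add, if_pos h2]

theorem pv_update_replicate {α : Type} [BEq α] [LawfulBEq α] (s : PySem.Set α) (x : α) (c : Nat)
    (hc : 0 < c) : PySem.Set.update s (List.replicate c x) = PySem.Set.add s x := by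
  induction c generalizing s with
  | zero => omega
  | succ c ih =>
    show PySem.Set.update (PySem.Set.add s x) (List.replicate c x) = _
    rcases Nat.eq_zero_or_pos c with rfl | hc'
    · rfl
    · rw [ih _ hc', pv_add_add]

theorem pv_update_flatMap_replicate {α : Type} [BEq α] [LawfulBEq α] (s : PySem.Set α)
    (L : List α) (c : Nat) (hc : 0 < c) :
    PySem.Set.update s (L.flatMap (fun x => List.replicate c x)) = PySem.Set.update s L := by
  induction L generalizing s with
  | nil => rfl
  | cons x L ih =>
    rw [List.flatMap_cons, pv_update_append, pv_update_replicate s x c hc]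
    exact ih _

theorem pv_ofList_flatMap_replicate {α : Type} [BEq α] [LawfulBEq α] (L : List α) (c : Nat)
    (hc : 0 < c) :
    PySem.Set.ofList (L.flatMap (fun x => List.replicate c x)) = PySem.Set.ofList L := by
  rw [pv_ofList_eq_update, pv_ofList_eq_update]
  exact pv_update_flatMap_replicate _ _ _ hc

theorem pv_foldl_add_map {α β : Type} [BEq β] (s : PySem.Set β) (f : α → β) (L : List α) :
    L.foldl (fun s x => PySem.Set.add s (f x)) s = PySem.Set.update s (L.map f) := by
  rw [PySem.Set.update, List.foldl_map]

theorem pv_foldl_update_flatMap {α β : Type} [BEq β] (s : PySem.Set β) (g : α → List β) (P : List α) :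
    P.foldl (fun acc p => PySem.Set.update acc (g p)) s = PySem.Set.update s (P.flatMap g) := by
  induction P generalizing s with
  | nil => rfl
  | cons p P ih => rw [List.foldl_cons, List.flatMap_cons, pv_update_append, ih]

theorem pv_update_flatMap_const {β : Type} [BEq β] [LawfulBEq β] (s : PySem.Set β)
    (X : List β) (a : Nat) (ha : 0 < a) :
    PySem.Set.update s ((List.range a).flatMap (fun _ => X)) = PySem.Set.update s X := by
  induction a generalizing s with
  | zero => omega
  | succ a ih =>
    rcases Nat.eq_zero_or_pos a with rfl | ha'
    · simp [List.range_succ]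
    · rw [List.range_succ, List.flatMap_append, pv_update_append, ih _ ha']
      simp only [List.flatMap_cons, List.flatMap_nil, List.append_nil]
      apply pv_update_sub
      intro x hx
      rw [pv_mem_update]
      exact Or.inr hx

theorem pv_update_nil {α : Type} [BEq α] (s : PySem.Set α) : PySem.Set.update s [] = s := rfl

-- ---- the deduplicated permutations of the D/M pool, in order ----
def patsAB : Nat → Nat → Nat → List (List Char)
  | 0, _, _ => [[]]
  | r+1, a, b =>
    (if 0 < a then (patsAB r (a-1) b).map (fun p => 'D' :: p) else []) ++
    (if 0 < b then (patsAB r a (b-1)).map (fun p => 'M' :: p) else [])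

theorem pv_perms_DM (r : Nat) : ∀ (a b : Nat), r ≤ a + b →
    PySem.Set.ofList (PySem.List.permutations (List.replicate a 'D' ++ List.replicate b 'M') r) =
      patsAB r a b := by
  induction r with
  | zero => intro a b _; simp [PySem.List.permutations, patsAB]; rfl
  | succ r ih =>
    intro a b h
    have hlen : (List.replicate a 'D' ++ List.replicate b 'M').length = a + b := by simp
    have hsplit : PySem.List.permutations (List.replicate a 'D' ++ List.replicate b 'M') (r+1)
        = ((List.range a).flatMap (fun _ =>
            (PySem.List.permutations (List.replicate (a-1) 'D' ++ List.replicate b 'M') r).map (fun p => 'D' :: p)))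
          ++ ((List.range b).flatMap (fun _ =>
            (PySem.List.permutations (List.replicate a 'D' ++ List.replicate (b-1) 'M') r).map (fun p => 'M' :: p))) := by
      rw [PySem.List.permutations.eq_2, hlen, List.range_add, List.flatMap_append, List.flatMap_map]
      congr 1
      · apply List.flatMap_congr
        intro i hi
        have hia : i < a := List.mem_range.1 hi
        have hget : (List.replicate a 'D' ++ List.replicate b 'M')[i]? = some 'D' := by
          rw [List.getElem?_append_left (by simp [hia]), List.getElem?_replicate, if_pos hia]
        have herase : (List.replicate a 'D' ++ List.replicate b 'M').eraseIdx i
            = List.replicate (a-1) 'D' ++ List.replicate b 'M' := by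
          rw [List.eraseIdx_append_of_lt_length (by simp [hia]), List.eraseIdx_replicate, if_pos hia]
        rw [hget, herase]
      · apply List.flatMap_congr
        intro j hj
        have hjb : j < b := List.mem_range.1 hj
        have hget : (List.replicate a 'D' ++ List.replicate b 'M')[a + j]? = some 'M' := by
          rw [List.getElem?_append_right (by simp), List.getElem?_replicate]
          simp [hjb]
        have herase : (List.replicate a 'D' ++ List.replicate b 'M').eraseIdx (a + j)
            = List.replicate a 'D' ++ List.replicate (b-1) 'M' := by
          rw [List.eraseIdx_append_of_length_le (by simp), List.eraseIdx_replicate]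
          simp [hjb]
        rw [hget, herase]
    rw [hsplit, pv_ofList_eq_update, pv_update_append]
    rcases Nat.eq_zero_or_pos a with rfl | ha
    · have hb : 0 < b := by omega
      simp only [List.range_zero, List.flatMap_nil]
      simp only [pv_update_nil]
      rw [pv_update_flatMap_const _ _ _ hb, ← pv_ofList_eq_update]
      rw [pv_ofList_map_inj _ (fun p q hpq => by simpa using hpq), ih 0 (b-1) (by omega)]
      show _ = patsAB (r+1) 0 b
      simp only [patsAB, if_neg (lt_irrefl 0), if_pos hb, List.nil_append]
    · rcases Nat.eq_zero_or_pos b with rfl | hb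
      · simp only [List.range_zero, List.flatMap_nil]
        simp only [pv_update_nil]
        rw [pv_update_flatMap_const _ _ _ ha, ← pv_ofList_eq_update]
        rw [pv_ofList_map_inj _ (fun p q hpq => by simpa using hpq), ih (a-1) 0 (by omega)]
        show _ = patsAB (r+1) a 0
        simp only [patsAB, if_pos ha, if_neg (lt_irrefl 0), List.append_nil]
      · rw [pv_update_flatMap_const _ _ _ ha, ← pv_ofList_eq_update]
        rw [pv_ofList_map_inj _ (fun p q hpq => by simpa using hpq), ih (a-1) b (by omega)]
        rw [pv_update_flatMap_const _ _ _ hb, pv_update_canon]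
        have hfilter : (PySem.Set.ofList ((PySem.List.permutations (List.replicate a 'D' ++ List.replicate (b-1) 'M') r).map (fun p => 'M' :: p))).filter
            (fun y => !(PySem.Set.contains ((patsAB r (a-1) b).map (fun p => 'D' :: p)) y))
            = PySem.Set.ofList ((PySem.List.permutations (List.replicate a 'D' ++ List.replicate (b-1) 'M') r).map (fun p => 'M' :: p)) := by
          apply List.filter_eq_self.2
          intro y hy
          rw [PySem.Set.mem_ofList] at hy
          obtain ⟨p', _, rfl⟩ := List.mem_map.1 hy
          have hnm : ('M' :: p') ∉ (patsAB r (a-1) b).map (fun p => 'D' :: p) := by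
            intro hmem
            obtain ⟨q', _, hq'⟩ := List.mem_map.1 hmem
            exact absurd hq' (by simp)
          simp [PySem.Set.contains, hnm]
        rw [hfilter, pv_ofList_map_inj _ (fun p q hpq => by simpa using hpq), ih a (b-1) (by omega)]
        show _ = patsAB (r+1) a b
        simp only [patsAB, if_pos ha, if_pos hb]

theorem pv_patsAB_all_D (r : Nat) : ∀ (a : Nat), r ≤ a → patsAB r a 0 = [List.replicate r 'D'] := by
  induction r with
  | zero => intro a _; rfl
  | succ r ih =>
    intro a ha
    have h0 : 0 < a := by omega
    simp only [patsAB, if_pos h0, if_neg (lt_irrefl 0), List.append_nil]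
    rw [ih (a-1) (by omega)]
    rfl

theorem pv_patsB_eq (n : Nat) : ∀ (r : Nat), patsB n r = patsAB n (min r n) (n - r) := by
  induction n with
  | zero => intro r; rfl
  | succ n ih =>
    intro r
    show (if 0 < r then (patsB n (r-1)).map (fun p => 'D' :: p) else []) ++
        (if r < n+1 then (patsB n r).map (fun p => 'M' :: p) else []) =
      (if 0 < min r (n+1) then (patsAB n (min r (n+1) - 1) (n+1-r)).map (fun p => 'D' :: p) else []) ++
      (if 0 < n+1-r then (patsAB n (min r (n+1)) (n+1-r-1)).map (fun p => 'M' :: p) else [])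
    congr 1
    · by_cases hr : 0 < r
      · rw [if_pos hr, if_pos (by omega : 0 < min r (n+1)), ih (r-1)]
        have e1 : min (r-1) n = min r (n+1) - 1 := by omega
        have e2 : n - (r-1) = n+1-r := by omega
        rw [e1, e2]
      · rw [if_neg hr, if_neg (by omega : ¬ 0 < min r (n+1))]
    · by_cases hr : r < n+1
      · rw [if_pos hr, if_pos (by omega : 0 < n+1-r), ih r]
        have e1 : min r n = min r (n+1) := by omega
        have e2 : n - r = n+1-r-1 := by omega
        rw [e1, e2]
      · rw [if_neg hr, if_neg (by omega : ¬ 0 < n+1-r)]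

-- ---- patsB invariants ----
theorem pv_patsB_mem (n : Nat) : ∀ (r : Nat) (p : List Char), p ∈ patsB n r →
    p.length = n ∧ p.count 'D' = min r n ∧ ∀ c ∈ p, c = 'D' ∨ c = 'M' := by
  induction n with
  | zero =>
    intro r p hp
    simp [patsB] at hp
    subst hp
    simp
  | succ n ih =>
    intro r p hp
    have hp' : p ∈ (if 0 < r then (patsB n (r-1)).map (fun p => 'D' :: p) else []) ++
        (if r < n+1 then (patsB n r).map (fun p => 'M' :: p) else []) := hp
    rcases List.mem_append.1 hp' with h | h
    · by_cases hr : 0 < r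
      · rw [if_pos hr] at h
        obtain ⟨q, hq, rfl⟩ := List.mem_map.1 h
        obtain ⟨hl, hc, hdm⟩ := ih (r-1) q hq
        refine ⟨by simp [hl], ?_, ?_⟩
        · simp only [List.count_cons, hc, beq_self_eq_true, if_pos]
          omega
        · intro c hcm
          rcases List.mem_cons.1 hcm with rfl | hcm'
          · exact Or.inl rfl
          · exact hdm c hcm'
      · rw [if_neg hr] at h; cases h
    · by_cases hr : r < n+1
      · rw [if_pos hr] at h
        obtain ⟨q, hq, rfl⟩ := List.mem_map.1 h
        obtain ⟨hl, hc, hdm⟩ := ih r q hq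
        refine ⟨by simp [hl], ?_, ?_⟩
        · simp only [List.count_cons, hc, show (('M' : Char) == 'D') = false by decide,
            Bool.false_eq_true, if_false]
          omega
        · intro c hcm
          rcases List.mem_cons.1 hcm with rfl | hcm'
          · exact Or.inr rfl
          · exact hdm c hcm'
      · rw [if_neg hr] at h; cases h

-- ---- product facts ----
theorem pv_prod_len (n : Nat) : (pyProduct4 n).length = 4 ^ n := by
  induction n with
  | zero => rfl
  | succ n ih => simp [pyProduct4, ih, pow_succ]; ring

theorem pv_prod_mem_len (n : Nat) (u : List Char) (hu : u ∈ pyProduct4 n) : u.length = n := by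
  induction n generalizing u with
  | zero => simp [pyProduct4] at hu; simp [hu]
  | succ n ih =>
    simp only [pyProduct4, List.mem_flatMap, List.mem_map] at hu
    obtain ⟨c, _, p, hp, rfl⟩ := hu
    simp [ih p hp]

theorem pv_prod_split (m e : Nat) :
    pyProduct4 (m + e) = (pyProduct4 m).flatMap (fun u => (pyProduct4 e).map (fun v => u ++ v)) := by
  induction m with
  | zero => simp [pyProduct4]
  | succ m ih =>
    have : m + 1 + e = (m + e) + 1 := by omega
    rw [this]
    simp only [pyProduct4, ih, List.flatMap_map, List.map_flatMap, List.flatMap_assoc]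
    apply List.flatMap_congr
    intro c _
    simp [List.map_map, Function.comp_def]

-- ---- the kmer-building loop vs the recursive substitution ----
def kmerRec : List Char → List Char → List Char → List Char
  | [], _, _ => []
  | p :: ps, chars, u =>
    if p = 'M' then chars.getD 0 ' ' :: kmerRec ps (chars.drop 1) u
    else u.getD 0 ' ' :: kmerRec ps (chars.drop 1) (u.drop 1)

theorem pv_getD_drop {α : Type} (xs : List α) (n : Nat) (d : α) :
    (xs.drop n).getD 0 d = xs.getD n d := by
  simp [List.getD, List.getElem?_drop]

theorem pv_loop_eq (p : List Char) : ∀ (P C nu : List Char) (a : Nat) (acc : List Char) (c : Nat),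
    P.drop a = p →
    ((List.range' a p.length).foldl (kmerStep P C nu) (acc, c)).1 =
      acc ++ kmerRec p (C.drop a) (nu.drop c) := by
  induction p with
  | nil => intro P C nu a acc c _; simp [kmerRec]
  | cons q ps ih =>
    intro P C nu a acc c hP
    have hPa : P[a]? = some q := by
      have h0 := List.getElem?_drop (xs := P) (i := a) (j := 0)
      rw [hP] at h0
      simpa using h0.symm
    have hPdrop : P.drop (a+1) = ps := by
      rw [← List.drop_drop (i := 1) (j := a), hP]; rfl
    have hCdrop : C.drop (a+1) = (C.drop a).drop 1 := by
      rw [← List.drop_drop (i := 1) (j := a)]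
    show ((List.range' a (ps.length + 1)).foldl (kmerStep P C nu) (acc, c)).1 = _
    rw [List.range'_succ, List.foldl_cons]
    by_cases hq : q = 'M'
    · rw [show kmerStep P C nu (acc, c) a = (acc ++ [C.getD a ' '], c) by
        simp [kmerStep, hPa, hq]]
      rw [ih P C nu (a+1) (acc ++ [C.getD a ' ']) c hPdrop]
      rw [show kmerRec (q :: ps) (C.drop a) (nu.drop c)
          = (C.drop a).getD 0 ' ' :: kmerRec ps ((C.drop a).drop 1) (nu.drop c) by
        simp [kmerRec, hq]]
      rw [pv_getD_drop, hCdrop, List.append_assoc]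
      rfl
    · rw [show kmerStep P C nu (acc, c) a = (acc ++ [nu.getD c ' '], c + 1) by
        simp [kmerStep, hPa, hq]]
      rw [ih P C nu (a+1) (acc ++ [nu.getD c ' ']) (c+1) hPdrop]
      rw [show kmerRec (q :: ps) (C.drop a) (nu.drop c)
          = (nu.drop c).getD 0 ' ' :: kmerRec ps ((C.drop a).drop 1) ((nu.drop c).drop 1) by
        simp [kmerRec, hq]]
      have hnu : nu.drop (c+1) = (nu.drop c).drop 1 := by
        rw [← List.drop_drop (i := 1) (j := c)]
      rw [pv_getD_drop, hCdrop, hnu, List.append_assoc]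
      rfl

-- ---- fillB as a map over the product ----
theorem pv_fill_eq (p : List Char) : ∀ (chars : List Char), (∀ c ∈ p, c = 'D' ∨ c = 'M') →
    fillB p chars = (pyProduct4 (p.count 'D')).map (fun u => kmerRec p chars u) := by
  induction p with
  | nil => intro chars _; rfl
  | cons q ps ih =>
    intro chars hp
    have hps : ∀ c ∈ ps, c = 'D' ∨ c = 'M' := fun c hc => hp c (List.mem_cons_of_mem _ hc)
    rcases hp q (by simp) with rfl | rfl
    · have hq : ¬ ('D' : Char) = 'M' := by decide
      show (if ('D' : Char) = 'M' then (fillB ps (chars.drop 1)).map (fun r => chars.getD 0 ' ' :: r)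
          else ['A','C','G','T'].flatMap (fun c => (fillB ps (chars.drop 1)).map (fun r => c :: r))) = _
      rw [if_neg hq]
      have hcnt : (('D' :: ps).count 'D') = ps.count 'D' + 1 := by simp
      rw [hcnt]
      show _ = (pyProduct4 (ps.count 'D' + 1)).map _
      rw [show pyProduct4 (ps.count 'D' + 1)
          = ['A','C','G','T'].flatMap (fun c => (pyProduct4 (ps.count 'D')).map (fun p => c :: p)) from rfl]
      rw [List.map_flatMap]
      apply List.flatMap_congr
      intro c _
      rw [List.map_map, ih _ hps, List.map_map]
      apply List.map_congr_left
      intro u _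
      simp [Function.comp, kmerRec, hq]
    · show (if ('M' : Char) = 'M' then (fillB ps (chars.drop 1)).map (fun r => chars.getD 0 ' ' :: r)
          else ['A','C','G','T'].flatMap (fun c => (fillB ps (chars.drop 1)).map (fun r => c :: r))) = _
      rw [if_pos rfl]
      have hcnt : (('M' :: ps).count 'D') = ps.count 'D' := by simp
      rw [hcnt, ih _ hps, List.map_map]
      apply List.map_congr_left
      intro u _
      simp [Function.comp, kmerRec]

theorem pv_kmerRec_append (p : List Char) : ∀ (chars u v : List Char),
    (∀ c ∈ p, c = 'D' ∨ c = 'M') → p.count 'D' ≤ u.length →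
    kmerRec p chars (u ++ v) = kmerRec p chars u := by
  induction p with
  | nil => intro chars u v _ _; rfl
  | cons q ps ih =>
    intro chars u v hp hc
    have hps : ∀ c ∈ ps, c = 'D' ∨ c = 'M' := fun c hcm => hp c (List.mem_cons_of_mem _ hcm)
    rcases hp q (by simp) with rfl | rfl
    · have hcnt : (('D' :: ps).count 'D') = ps.count 'D' + 1 := by simp
      rw [hcnt] at hc
      cases u with
      | nil => simp at hc
      | cons w u' =>
        have hq : ¬ ('D' : Char) = 'M' := by decide
        simp only [kmerRec, if_neg hq, List.cons_append, List.drop_succ_cons,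
          List.drop_zero, List.getD_cons_zero]
        rw [ih _ u' v hps (by simpa using hc)]
    · have hcnt : (('M' :: ps).count 'D') = ps.count 'D' := by simp
      rw [hcnt] at hc
      have h1 : kmerRec ('M'::ps) chars (u++v) = chars.getD 0 ' ' :: kmerRec ps (chars.drop 1) (u++v) := by
        simp [kmerRec]
      have h2 : kmerRec ('M'::ps) chars u = chars.getD 0 ' ' :: kmerRec ps (chars.drop 1) u := by
        simp [kmerRec]
      rw [h1, h2, ih _ u v hps hc]

theorem pv_patsAB_patsB (n r : Nat) : patsAB n r (n - r) = patsB n r := by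
  rw [pv_patsB_eq]
  rcases Nat.lt_or_ge n r with hrn | hrn
  · rw [Nat.min_eq_right (Nat.le_of_lt hrn), show n - r = 0 by omega]
    rw [pv_patsAB_all_D n r (Nat.le_of_lt hrn), pv_patsAB_all_D n n (Nat.le_refl n)]
  · rw [Nat.min_eq_left hrn]

theorem pv_update_empty {α : Type} [BEq α] (L : List α) :
    PySem.Set.update PySem.Set.empty L = PySem.Set.ofList L := rfl

theorem pv_mk_inj : Function.Injective String.ofList := by
  intro a b hab
  simpa using congrArg String.toList hab

theorem pv_ports_eq (motifL : List Char) (kn dn : Nat) :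
    PySem.Set.update PySem.Set.empty
      ((PySem.Set.update PySem.Set.empty
          ((PySem.List.permutations (List.replicate dn 'D' ++ List.replicate (kn - dn) 'M') kn).map
            (fun mp => String.ofList mp))).flatMap
        (fun pattern => (pyProduct4 dn).map (fun nu =>
          String.ofList (((List.range kn).foldl (kmerStep pattern.toList motifL nu) ([], 0)).1))))
    = PySem.Set.ofList ((patsB kn dn).flatMap (fun pat =>
        (fillB pat motifL).map (fun km => String.ofList km))) := by
  rw [pv_update_empty, pv_update_empty]
  rw [show ((PySem.List.permutations (List.replicate dn 'D' ++ List.replicate (kn - dn) 'M') kn).map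
        (fun mp => String.ofList mp))
      = ((PySem.List.permutations (List.replicate dn 'D' ++ List.replicate (kn - dn) 'M') kn).map
        String.ofList) from rfl]
  rw [pv_ofList_map_inj String.ofList pv_mk_inj]
  rw [pv_perms_DM kn dn (kn - dn) (by omega), pv_patsAB_patsB kn dn]
  rw [List.flatMap_map]
  have key : ∀ p ∈ patsB kn dn,
      (pyProduct4 dn).map (fun nu =>
        String.ofList (((List.range kn).foldl (kmerStep (String.ofList p).toList motifL nu) ([], 0)).1))
      = ((fillB p motifL).map (fun km => String.ofList km)).flatMap
          (fun x => List.replicate (4 ^ (dn - min dn kn)) x) := by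
    intro p hp
    obtain ⟨hl, hcnt, hdm⟩ := pv_patsB_mem kn dn p hp
    have hloop : ∀ nu : List Char,
        ((List.range kn).foldl (kmerStep (String.ofList p).toList motifL nu) ([], 0)).1
          = kmerRec p motifL nu := by
      intro nu
      have h0 := pv_loop_eq p p motifL nu 0 [] 0 (by simp)
      simp only [String.toList_ofList]
      rw [List.range_eq_range', ← hl, h0, List.drop_zero, List.drop_zero, List.nil_append]
    simp only [hloop]
    have hsplit : pyProduct4 dn
        = (pyProduct4 (min dn kn)).flatMap (fun u =>
            (pyProduct4 (dn - min dn kn)).map (fun v => u ++ v)) := by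
      conv_lhs => rw [show dn = min dn kn + (dn - min dn kn) by omega]
      exact pv_prod_split _ _
    rw [hsplit, List.map_flatMap]
    rw [pv_fill_eq p motifL hdm, List.map_map, List.flatMap_map, hcnt]
    apply List.flatMap_congr
    intro u hu
    have hulen : u.length = min dn kn := pv_prod_mem_len _ u hu
    have hk : ∀ v ∈ pyProduct4 (dn - min dn kn),
        String.ofList (kmerRec p motifL (u ++ v))
          = String.ofList (kmerRec p motifL u) := by
      intro v _
      rw [pv_kmerRec_append p motifL u v hdm (by rw [hcnt, hulen])]
    simp only [List.map_map, Function.comp_def]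
    rw [List.map_congr_left hk, List.map_const', pv_prod_len]
  rw [List.flatMap_congr key, ← List.flatMap_assoc]
  exact pv_ofList_flatMap_replicate _ _ (by positivity)

-- ===== VERDICT (by name: the statement is the Claim_ definition above) =====
theorem approximating_matching_kmers_spec : Claim_equal_approximating_matching_kmers := by
  intro motif k d _ _
  show approximating_matching_kmers motif k d = approximating_matching_kmers_alt motif k d
  unfold approximating_matching_kmers approximating_matching_kmers_alt
  simp only [pv_foldl_add_map, pv_foldl_update_flatMap]
  exact pv_ports_eq motif.toList k.toNat d.toNat
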